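-- pv_equiv track=rewrite | github.com/Oatmeal-Lin/SMS-Location-Identification-Attack | logcat.py | is_new_line
-- ===== SOURCE A (Python) =====
-- HEADER_LIST = ["NO", "sender_phone", "sender_num", "sender_address",
--                "receiver_phone", "receiver_num", "receiver_address",
--                "SEND_1", "SEND_2", "SEND_3",
--                "ACKNOWLEDGEMENT_1", "ACKNOWLEDGEMENT_2",
--                "REPORT_1", "REPORT_2"]
--
-- def is_new_line(datalist, key):
--     flag = False
--     for i in HEADER_LIST:
--         if not flag:
--             if key == i:
--                 flag = True
--         else:
--             if datalist[i]:
--                 return True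
--     return False
-- ===== SOURCE B (Python) =====
-- HEADER_LIST = ["NO", "sender_phone", "sender_num", "sender_address",
--                "receiver_phone", "receiver_num", "receiver_address",
--                "SEND_1", "SEND_2", "SEND_3",
--                "ACKNOWLEDGEMENT_1", "ACKNOWLEDGEMENT_2",
--                "REPORT_1", "REPORT_2"]
--
-- def is_new_line(datalist, key):
--     # Invert the iteration: instead of walking the header list and probing the
--     # dict, build a position index for the headers once and walk the DATA dict,
--     # asking for each truthy entry whether its header lies after the key.
--     pos = {h: i for i, h in enumerate(HEADER_LIST)}
--     kpos = pos.get(key)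
--     if kpos is None:
--         return False
--     return any(v and pos.get(h, -1) > kpos for h, v in datalist.items())
-- ===== Notes on version B (the rewrite author's own statement) =====
-- stated objective: alternative
-- what changed: Inverts the iteration: instead of walking the header list with a flag and probing the dict, B builds a header->position index once and scans the data dict's items, testing for each truthy entry whether its header position lies after the key's.
import Mathlib
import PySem

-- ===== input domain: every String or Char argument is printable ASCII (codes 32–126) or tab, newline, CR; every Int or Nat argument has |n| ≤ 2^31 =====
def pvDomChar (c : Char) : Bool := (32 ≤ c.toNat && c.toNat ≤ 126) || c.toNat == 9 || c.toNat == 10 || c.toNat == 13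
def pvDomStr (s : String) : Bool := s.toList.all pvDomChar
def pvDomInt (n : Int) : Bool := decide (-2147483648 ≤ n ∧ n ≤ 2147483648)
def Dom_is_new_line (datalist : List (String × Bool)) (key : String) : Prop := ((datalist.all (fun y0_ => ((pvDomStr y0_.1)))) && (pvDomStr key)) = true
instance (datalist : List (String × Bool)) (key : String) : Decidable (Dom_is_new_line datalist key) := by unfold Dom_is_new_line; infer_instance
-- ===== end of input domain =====

-- B inverts the iteration: it indexes the headers by position once and scans the DATA
-- dict instead of the header list (simpler decomposition, same cost; return value only).

def HEADER_LIST : List String :=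
  ["NO", "sender_phone", "sender_num", "sender_address",
   "receiver_phone", "receiver_num", "receiver_address",
   "SEND_1", "SEND_2", "SEND_3",
   "ACKNOWLEDGEMENT_1", "ACKNOWLEDGEMENT_2",
   "REPORT_1", "REPORT_2"]

-- ===== PORT A =====
-- A's for-loop with the `flag` state and early `return True`; `datalist[i]` is a dict
-- lookup that raises KeyError on a missing key — `(get? …).getD false` is exact inside
-- Pre_is_new_line, which excludes exactly the raising inputs.
def isNewLineGo (d : PySem.Dict String Bool) (key : String) (flag : Bool) :
    List String → Bool
  | [] => false
  | i :: rest =>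
    if !flag then
      if key == i then isNewLineGo d key true rest
      else isNewLineGo d key false rest
    else
      if (PySem.Dict.get? d i).getD false then true
      else isNewLineGo d key flag rest

def is_new_line (datalist : List (String × Bool)) (key : String) : Bool :=
  isNewLineGo (PySem.Dict.ofList datalist) key false HEADER_LIST

-- ===== PORT B =====
-- pos = {h: i for i, h in enumerate(HEADER_LIST)}; kpos = pos.get(key); if None → False;
-- any(v and pos.get(h, -1) > kpos for h, v in datalist.items()).  `any` over dict items is
-- order-independent, so iterating the Dict's items list is exact.
def posDict : PySem.Dict String Int :=
  PySem.Dict.ofList ((PySem.List.enumerate HEADER_LIST).map (fun p => (p.2, p.1)))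

def is_new_line_alt (datalist : List (String × Bool)) (key : String) : Bool :=
  match PySem.Dict.get? posDict key with
  | none => false
  | some kpos =>
      (PySem.Dict.ofList datalist).items.any
        (fun p => p.2 && decide (PySem.Dict.getD posDict p.1 (-1) > kpos))

-- ===== PRECONDITION & SPEC =====
-- Pre_ excludes exactly the inputs where the Python A raises KeyError: key occurs in
-- HEADER_LIST and, among the headers after it, a key missing from datalist is reached
-- before any truthy value; B never raises there and returns whether any present header after the key is truthy.
def Pre_is_new_line (datalist : List (String × Bool)) (key : String) : Prop :=
  let d := PySem.Dict.ofList datalist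
  let tail := (HEADER_LIST.dropWhile (fun h => h != key)).tail
  let pres := tail.takeWhile (fun h => (PySem.Dict.get? d h).isSome)
  pres.length = tail.length ∨ pres.any (fun h => (PySem.Dict.get? d h).getD false) = true
instance (datalist : List (String × Bool)) (key : String) : Decidable (Pre_is_new_line datalist key) := by unfold Pre_is_new_line; infer_instance

def pvWitness_is_new_line : (List (String × Bool)) × String := ([("sender_phone", true)], "NO")

def Spec_is_new_line (datalist : List (String × Bool)) (key : String) (out : Bool) : Prop := out = is_new_line_alt datalist key
instance (datalist : List (String × Bool)) (key : String) (out : Bool) : Decidable (Spec_is_new_line datalist key out) := by unfold Spec_is_new_line; infer_instance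

-- ===== CLAIM (what is proved, stated in full; the proofs are below) =====
def Claim_equal_is_new_line : Prop := ∀ (datalist : List (String × Bool)) (key : String), Dom_is_new_line datalist key → Pre_is_new_line datalist key → Spec_is_new_line datalist key (is_new_line datalist key)

-- ===== LEMMAS AND PROOFS =====

theorem header_list_nodup : HEADER_LIST.Nodup := by decide

-- After the key has been found, A's scan is `any` over the remaining headers
-- (with the getD-false reading of the lookup, which Pre_ makes exact).
theorem scan_eq_any (d : PySem.Dict String Bool) (key : String) :
    ∀ (tail : List String),
      isNewLineGo d key true tail = tail.any (fun h => (PySem.Dict.get? d h).getD false) := by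
  intro tail
  induction tail with
  | nil => simp [isNewLineGo]
  | cons i rest ih =>
    cases hv : (PySem.Dict.get? d i).getD false with
    | false => simp [isNewLineGo, hv, ih]
    | true => simp [isNewLineGo, hv]

-- If the key does not occur, A's scan with flag = false returns false.
theorem go_notMem (d : PySem.Dict String Bool) (key : String) :
    ∀ (L : List String), key ∉ L → isNewLineGo d key false L = false := by
  intro L
  induction L with
  | nil => intro _; simp [isNewLineGo]
  | cons i rest ih =>
    intro h
    have h1 : key ≠ i := fun e => h (e ▸ List.mem_cons_self ..)
    have h2 : key ∉ rest := fun e => h (List.mem_cons_of_mem _ e)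
    simp [isNewLineGo, h1, ih h2]

-- A's scan over pre ++ key :: suf with the key absent from pre is the flag = true
-- scan over suf.
theorem go_split (d : PySem.Dict String Bool) (key : String) :
    ∀ (pre suf : List String), key ∉ pre →
      isNewLineGo d key false (pre ++ key :: suf) = isNewLineGo d key true suf := by
  intro pre
  induction pre with
  | nil => intro suf _; simp [isNewLineGo]
  | cons i rest ih =>
    intro suf h
    have h1 : key ≠ i := fun e => h (e ▸ List.mem_cons_self ..)
    have h2 : key ∉ rest := fun e => h (List.mem_cons_of_mem _ e)
    simp [isNewLineGo, h1, ih suf h2]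

-- index? over an append whose first part misses the value.
theorem index?_append_of_not_mem {α : Type} [BEq α] [LawfulBEq α]
    (pre L : List α) (v : α) (h : v ∉ pre) :
    PySem.List.index? (pre ++ L) v = (PySem.List.index? L v).map (· + pre.length) := by
  induction pre with
  | nil => simp
  | cons i rest ih =>
    have h1 : i ≠ v := fun e => h (e ▸ List.mem_cons_self ..)
    have h2 : v ∉ rest := fun e => h (List.mem_cons_of_mem _ e)
    rw [List.cons_append, PySem.List.index?_cons_of_ne _ h1, ih h2]
    cases PySem.List.index? L v <;> simp <;> omega

-- The position dict built from enumerate looks up the first index in the list.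
theorem get?_pos_dict {α : Type} [BEq α] [LawfulBEq α] :
    ∀ (L : List α) (st : Int) (x : α),
      (((PySem.List.enumerate L st).map (fun p => (p.2, p.1))).find?
          (fun p => p.1 == x)).map (·.2)
        = (PySem.List.index? L x).map (fun n => st + (n : Int)) := by
  intro L
  induction L with
  | nil => intro st x; simp [PySem.List.enumerate_nil]
  | cons a t ih =>
    intro st x
    rw [PySem.List.enumerate_cons, List.map_cons]
    by_cases he : a = x
    · subst he
      rw [PySem.List.index?_cons_self, List.find?_cons_of_pos (by simp)]
      simp
    · rw [List.find?_cons_of_neg (by simp [he]), ih (st + 1) x,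
        PySem.List.index?_cons_of_ne _ he]
      cases PySem.List.index? t x with
      | none => simp
      | some n => simp; omega

-- ===== VERDICT (by name: the statement is the Claim_ definition above) =====
theorem is_new_line_spec : Claim_equal_is_new_line := by
  intro datalist key _ _
  unfold Spec_is_new_line is_new_line is_new_line_alt
  set d : PySem.Dict String Bool := PySem.Dict.ofList datalist with hd
  have hnd : d.keys.Nodup := PySem.Dict.nodup_keys_ofList datalist
  -- lookup in the pos dict is index? in HEADER_LIST
  have hpos : ∀ x : String,
      PySem.Dict.get? posDict x
        = (PySem.List.index? HEADER_LIST x).map (fun n => (n : Int)) := by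
    intro x
    have hit : posDict.items
        = (PySem.List.enumerate HEADER_LIST).map (fun p => (p.2, p.1)) := by decide
    rw [PySem.Dict.get?, hit]
    simpa using get?_pos_dict HEADER_LIST 0 x
  by_cases hmem : key ∈ HEADER_LIST
  · -- key present: decompose HEADER_LIST around its first occurrence
    obtain ⟨k, hk⟩ := Option.isSome_iff_exists.mp
      ((PySem.List.index?_isSome_iff HEADER_LIST key).mpr hmem)
    obtain ⟨pre, suf, hsplit, hlen, hpre⟩ :=
      (PySem.List.index?_eq_some_iff HEADER_LIST key k).mp hk
    have hkey : PySem.Dict.get? posDict key = some (k : Int) := by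
      rw [hpos key, hk]; rfl
    rw [hkey]
    show isNewLineGo d key false HEADER_LIST
        = d.items.any (fun p => p.2 && decide (PySem.Dict.getD posDict p.1 (-1) > (k : Int)))
    rw [hsplit, go_split d key pre suf hpre, scan_eq_any]
    -- both sides are `any`; compare as propositions
    rw [Bool.eq_iff_iff, List.any_eq_true, List.any_eq_true]
    have hndH := header_list_nodup
    rw [hsplit] at hndH
    constructor
    · rintro ⟨h, hhs, hget⟩
      have hgt : PySem.Dict.get? d h = some true := by
        cases hg : PySem.Dict.get? d h with
        | none => rw [hg] at hget; simp at hget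
        | some v => rw [hg] at hget; simp at hget; rw [hget]
      refine ⟨(h, true), PySem.Dict.mem_items_of_get?_eq_some _ hgt, ?_⟩
      -- position of h in HEADER_LIST is after k
      obtain ⟨m, hm⟩ := Option.isSome_iff_exists.mp
        ((PySem.List.index?_isSome_iff suf h).mpr hhs)
      have hpre' : h ∉ pre := by
        intro hin
        exact List.disjoint_of_nodup_append hndH hin (List.mem_cons_of_mem _ hhs)
      have hne : key ≠ h := by
        intro e; subst e
        exact (List.nodup_cons.mp (List.nodup_append.mp hndH).2.1).1 hhs
      have hidx : PySem.List.index? HEADER_LIST h = some (m + 1 + pre.length) := by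
        rw [hsplit, index?_append_of_not_mem _ _ _ hpre',
          PySem.List.index?_cons_of_ne _ hne, hm]
        rfl
      rw [PySem.Dict.getD_eq_get?_getD, hpos h, hidx]
      simp
      omega
    · rintro ⟨⟨h, v⟩, hpit, hcond⟩
      simp only [Bool.and_eq_true, decide_eq_true_eq] at hcond
      obtain ⟨hv, hgt⟩ := hcond
      have hget : PySem.Dict.get? d h = some v := PySem.Dict.get?_of_mem_items _ hpit hnd
      -- the pos lookup succeeded and exceeds k, so h sits in suf
      rw [PySem.Dict.getD_eq_get?_getD, hpos h] at hgt
      cases hix : PySem.List.index? HEADER_LIST h with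
      | none => rw [hix] at hgt; simp at hgt; omega
      | some j =>
        rw [hix] at hgt
        simp at hgt
        have hjk : k < j := by exact_mod_cast hgt
        obtain ⟨hj, hjget, _⟩ := PySem.List.getElem_of_index?_eq_some hix
        have hjlen : pre.length + 1 ≤ j := by omega
        have hopt : HEADER_LIST[j]? = some h := by
          rw [List.getElem?_eq_getElem hj, hjget]
        rw [hsplit, List.getElem?_append_right (by omega)] at hopt
        have hhs : h ∈ suf := by
          cases hcase : j - pre.length with
          | zero => omega
          | succ m =>
            rw [hcase] at hopt
            simp only [List.getElem?_cons_succ] at hopt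
            exact List.mem_of_getElem? hopt
        exact ⟨h, hhs, by rw [hget]; simpa using hv⟩
  · -- key absent: both sides are false
    have hn : PySem.List.index? HEADER_LIST key = none :=
      (PySem.List.index?_eq_none_iff _ _).mpr hmem
    have hkey : PySem.Dict.get? posDict key = none := by rw [hpos key, hn]; rfl
    rw [go_notMem d key HEADER_LIST hmem, hkey]
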